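-- pv_equiv track=rewrite | github.com/marcv81-test/algo | python/string/suffix_array.py | build_ranks
-- ===== SOURCE A (Python) =====
-- def build_ranks(suffixes, keys):
--     ranks = [-1] * len(suffixes)
--     current_rank = 1
--     ranks[suffixes[0]] = current_rank
--     for i in range(1, len(suffixes)):
--         if keys[suffixes[i-1]] != keys[suffixes[i]]:
--             current_rank += 1
--         ranks[suffixes[i]] = current_rank
--     return tuple(ranks), current_rank
-- ===== SOURCE B (Python) =====
-- def _runs(suffixes, keys):
--     # split suffixes into maximal consecutive runs of suffixes with equal key
--     if not suffixes:
--         return []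
--     runs = []
--     k, cur = keys[suffixes[0]], [suffixes[0]]
--     for s in suffixes[1:]:
--         if keys[s] == k:
--             cur.append(s)
--         else:
--             runs.append(cur)
--             k, cur = keys[s], [s]
--     runs.append(cur)
--     return runs
--
-- def build_ranks(suffixes, keys):
--     # run-length grouping: suffixes with equal keys form runs; every suffix in
--     # the g-th run (1-based) gets rank g, and the last run index is the top rank
--     ranks = [-1] * len(suffixes)
--     r = 0
--     for run in _runs(suffixes, keys):
--         r += 1
--         for s in run:
--             ranks[s] = r
--     return tuple(ranks), r
-- ===== Notes on version B (the rewrite author's own statement) =====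
-- stated objective: alternative
-- what changed: A fuses everything into one indexed loop that keeps a running rank counter and bumps it on each adjacent key inequality; B first materialises an explicit run-length grouping of the suffixes (maximal runs of equal key), then ranks every suffix by its run's 1-based index with a nested per-run scatter loop, the top rank being the number of runs.
-- outside the precondition, e.g. on build_ranks([0], []): A returns ((1,), 1), B raises IndexError
import Mathlib
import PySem

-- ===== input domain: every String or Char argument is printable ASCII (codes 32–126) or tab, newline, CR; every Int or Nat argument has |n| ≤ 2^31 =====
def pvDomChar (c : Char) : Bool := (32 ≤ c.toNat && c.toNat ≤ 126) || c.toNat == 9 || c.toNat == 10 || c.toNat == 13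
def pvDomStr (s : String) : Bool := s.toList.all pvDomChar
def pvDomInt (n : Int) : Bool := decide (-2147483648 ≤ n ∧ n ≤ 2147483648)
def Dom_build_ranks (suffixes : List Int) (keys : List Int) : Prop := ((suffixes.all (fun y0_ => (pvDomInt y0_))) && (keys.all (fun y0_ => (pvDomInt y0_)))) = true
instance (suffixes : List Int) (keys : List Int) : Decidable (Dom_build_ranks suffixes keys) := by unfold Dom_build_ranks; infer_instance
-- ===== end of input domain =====

-- B groups the suffixes into maximal runs of equal key and ranks each suffix by its run's 1-based index (alternative decomposition; same cost).


-- ===== PORT A =====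
def build_ranks (suffixes : List Int) (keys : List Int) : List Int × Int :=
  let ranks0 := List.replicate suffixes.length (-1 : Int)
  let current_rank : Int := 1
  let ranks1 := PySem.List.pySetD ranks0 (PySem.List.pyGetD suffixes 0 0) current_rank
  (PySem.List.pyRange 1 (PySem.List.len suffixes) 1).foldl
    (fun (st : List Int × Int) i =>
      let cr := if PySem.List.pyGetD keys (PySem.List.pyGetD suffixes (i - 1) 0) 0 ≠
                   PySem.List.pyGetD keys (PySem.List.pyGetD suffixes i 0) 0
                then st.2 + 1 else st.2
      (PySem.List.pySetD st.1 (PySem.List.pyGetD suffixes i 0) cr, cr))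
    (ranks1, current_rank)

-- ===== PORT B =====
-- _runs: maximal consecutive runs of suffixes with equal key (iterative, state = (emitted runs, current key, current run))
def pvRunsB (suffixes : List Int) (keys : List Int) : List (List Int) :=
  match suffixes with
  | [] => []
  | s0 :: rest =>
    let st := rest.foldl
      (fun (st : List (List Int) × Int × List Int) s =>
        let k := PySem.List.pyGetD keys s 0
        if k = st.2.1 then (st.1, st.2.1, st.2.2 ++ [s])
        else (st.1 ++ [st.2.2], k, [s]))
      ([], PySem.List.pyGetD keys s0 0, [s0])
    st.1 ++ [st.2.2]

def build_ranks_alt (suffixes : List Int) (keys : List Int) : List Int × Int :=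
  (pvRunsB suffixes keys).foldl
    (fun (st : List Int × Int) run =>
      let r := st.2 + 1
      (run.foldl (fun rk s => PySem.List.pySetD rk s r) st.1, r))
    (List.replicate suffixes.length (-1 : Int), (0 : Int))

-- ===== PRECONDITION & SPEC =====
-- Pre_ excludes inputs on which indexing raises IndexError; it also excludes single-element
-- suffix lists whose entry is out of range for keys: there A never reads keys and returns,
-- while B's grouping pass naturally raises.
def Pre_build_ranks (suffixes : List Int) (keys : List Int) : Prop :=
  suffixes ≠ [] ∧ ∀ s ∈ suffixes,
    PySem.Raise.InRange suffixes.length s ∧ PySem.Raise.InRange keys.length s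
instance (suffixes : List Int) (keys : List Int) : Decidable (Pre_build_ranks suffixes keys) := by
  unfold Pre_build_ranks; infer_instance
def pvWitness_build_ranks : List Int × List Int := ([1, 0, 2], [4, 4, 7])

def Spec_build_ranks (suffixes : List Int) (keys : List Int) (out : List Int × Int) : Prop :=
  out = build_ranks_alt suffixes keys
instance (suffixes : List Int) (keys : List Int) (out : List Int × Int) : Decidable (Spec_build_ranks suffixes keys out) := by
  unfold Spec_build_ranks; infer_instance

-- ===== CLAIM (what is proved, stated in full; the proofs are below) =====
def Claim_equal_build_ranks : Prop := ∀ (suffixes : List Int) (keys : List Int), Dom_build_ranks suffixes keys → Pre_build_ranks suffixes keys → Spec_build_ranks suffixes keys (build_ranks suffixes keys)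

-- ===== LEMMAS AND PROOFS =====

-- the key of a suffix (proof-only shorthand)
def pvF (keys : List Int) (s : Int) : Int := PySem.List.pyGetD keys s 0

-- recursive form of the run-splitting loop
def pvRunsAux (keys : List Int) : List Int → Int → List Int → List (List Int)
  | [], _, cur => [cur]
  | y :: ys, k, cur =>
    if pvF keys y = k then pvRunsAux keys ys k (cur ++ [y])
    else cur :: pvRunsAux keys ys (pvF keys y) [y]

-- the common normal form of both programs: walk the tail carrying the previous key
def pvPairFold (keys : List Int) : List Int → Int → List Int → Int → List Int × Int
  | [], _, ranks, r => (ranks, r)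
  | y :: ys, k, ranks, r =>
    let r' := if k ≠ pvF keys y then r + 1 else r
    pvPairFold keys ys (pvF keys y) (PySem.List.pySetD ranks y r') r'

lemma pvRange_shift (a b : Int) :
    PySem.List.pyRange (a + 1) (b + 1) 1 = (PySem.List.pyRange a b 1).map (· + 1) := by
  simp only [PySem.List.pyRange_one, List.map_map]
  have : b + 1 - (a + 1) = b - a := by ring
  rw [this]
  exact List.map_congr_left (fun k _ => by simp; ring)

lemma pvGetD_cons_shift (x : Int) (xs : List Int) (i : Int) (d : Int) (h : 1 ≤ i) :
    PySem.List.pyGetD (x :: xs) i d = PySem.List.pyGetD xs (i - 1) d := by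
  obtain ⟨m, rfl⟩ : ∃ m : Nat, i = (m : Int) + 1 := ⟨(i - 1).toNat, by omega⟩
  have e : (m : Int) + 1 - 1 = (m : Int) := by ring
  rw [e]
  rw [show ((m : Int) + 1) = ((m + 1 : Nat) : Int) from by push_cast; ring,
      PySem.List.pyGetD_natCast, PySem.List.pyGetD_natCast]
  simp [List.getD]

-- A's index loop over 1..len-1, reading suffixes[i-1] and suffixes[i], is a fold over adjacent pairs
lemma pvIdxFoldZip {σ : Type} (g : σ → Int × Int → σ) (d : Int) :
    ∀ (rest : List Int) (x : Int) (init : σ),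
    (PySem.List.pyRange 1 (PySem.List.len (x :: rest)) 1).foldl
        (fun st i => g st (PySem.List.pyGetD (x :: rest) (i - 1) d, PySem.List.pyGetD (x :: rest) i d)) init
      = ((x :: rest).zip rest).foldl g init := by
  intro rest
  induction rest with
  | nil =>
    intro x init
    rw [PySem.List.pyRange_one_eq_nil (by simp [PySem.List.len])]
    simp
  | cons y t ih =>
    intro x init
    have hlen : PySem.List.len (x :: y :: t) = (t.length : Int) + 2 := by
      simp [PySem.List.len]; ring
    rw [hlen, PySem.List.pyRange_one_cons (by omega)]
    simp only [List.foldl_cons]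
    have h01 : (PySem.List.pyGetD (x :: y :: t) (1 - 1) d, PySem.List.pyGetD (x :: y :: t) 1 d) = (x, y) := by
      norm_num [PySem.List.pyGetD_zero_cons]
      rw [pvGetD_cons_shift x (y :: t) 1 d le_rfl]
      norm_num [PySem.List.pyGetD_zero_cons]
    rw [h01]
    have h2 : (t.length : Int) + 2 = ((t.length : Int) + 1) + 1 := by ring
    rw [h2, pvRange_shift 1 ((t.length : Int) + 1), List.foldl_map]
    have hbody : ∀ (st : σ), ∀ i ∈ PySem.List.pyRange 1 ((t.length : Int) + 1) 1,
        g st (PySem.List.pyGetD (x :: y :: t) (i + 1 - 1) d, PySem.List.pyGetD (x :: y :: t) (i + 1) d)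
          = g st (PySem.List.pyGetD (y :: t) (i - 1) d, PySem.List.pyGetD (y :: t) i d) := by
      intro st i hi
      rw [PySem.List.mem_pyRange_one] at hi
      have e1 : i + 1 - 1 = i := by ring
      rw [e1, pvGetD_cons_shift x (y :: t) i d hi.1,
          pvGetD_cons_shift x (y :: t) (i + 1) d (by omega)]
      have e2 : i + 1 - 1 = i := by ring
      rw [e2]
    rw [PySem.List.foldl_congr_mem _ _ _ (g init (x, y)) hbody]
    have hlen2 : (t.length : Int) + 1 = PySem.List.len (y :: t) := by simp [PySem.List.len]
    rw [hlen2]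
    have hz : (x :: y :: t).zip (y :: t) = (x, y) :: ((y :: t).zip t) := rfl
    rw [hz, List.foldl_cons]
    exact ih y (g init (x, y))

-- A's fused zip fold is the pair walk
lemma pvFusedEqPairFold (keys : List Int) :
    ∀ (tl : List Int) (p : Int) (ranks : List Int) (r : Int),
    ((p :: tl).zip tl).foldl
        (fun (st : List Int × Int) ab =>
          let cr := if PySem.List.pyGetD keys ab.1 0 ≠ PySem.List.pyGetD keys ab.2 0 then st.2 + 1 else st.2
          (PySem.List.pySetD st.1 ab.2 cr, cr)) (ranks, r)
      = pvPairFold keys tl (pvF keys p) ranks r := by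
  intro tl
  induction tl with
  | nil => intro p ranks r; simp [pvPairFold]
  | cons y ys ih =>
    intro p ranks r
    have hz : (p :: y :: ys).zip (y :: ys) = (p, y) :: ((y :: ys).zip ys) := rfl
    rw [hz, List.foldl_cons]
    simp only [pvPairFold, pvF]
    rw [ih y]
    rfl

-- the foldl state loop of _runs equals the recursive run splitter
lemma pvRunsFoldlEqAux (keys : List Int) :
    ∀ (xs : List Int) (runs0 : List (List Int)) (k : Int) (cur : List Int),
    (let st := xs.foldl
        (fun (st : List (List Int) × Int × List Int) s =>
          let kk := PySem.List.pyGetD keys s 0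
          if kk = st.2.1 then (st.1, st.2.1, st.2.2 ++ [s])
          else (st.1 ++ [st.2.2], kk, [s]))
        (runs0, k, cur)
     st.1 ++ [st.2.2])
      = runs0 ++ pvRunsAux keys xs k cur := by
  intro xs
  induction xs with
  | nil => intro runs0 k cur; simp [pvRunsAux]
  | cons y ys ih =>
    intro runs0 k cur
    simp only [List.foldl_cons, pvRunsAux, pvF]
    by_cases h : PySem.List.pyGetD keys y 0 = k
    · rw [if_pos h, if_pos h]
      exact ih runs0 k (cur ++ [y])
    · rw [if_neg h, if_neg h]
      rw [ih (runs0 ++ [cur]) (PySem.List.pyGetD keys y 0) [y]]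
      simp
  
-- ranking the runs (r+1 to each member of the next run) is the pair walk
lemma pvGroupsEqPairFold (keys : List Int) :
    ∀ (xs : List Int) (k : Int) (cur : List Int) (ranks : List Int) (r : Int),
    (pvRunsAux keys xs k cur).foldl
        (fun (st : List Int × Int) run =>
          let r := st.2 + 1
          (run.foldl (fun rk s => PySem.List.pySetD rk s r) st.1, r))
        (ranks, r)
      = pvPairFold keys xs k (cur.foldl (fun rk s => PySem.List.pySetD rk s (r + 1)) ranks) (r + 1) := by
  intro xs
  induction xs with
  | nil => intro k cur ranks r; simp [pvRunsAux, pvPairFold]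
  | cons y ys ih =>
    intro k cur ranks r
    simp only [pvRunsAux]
    by_cases h : pvF keys y = k
    · rw [if_pos h]
      rw [ih k (cur ++ [y]) ranks r]
      simp only [pvPairFold]
      rw [if_neg (by rw [h]; exact fun hne => hne rfl)]
      rw [List.foldl_append]
      simp [h]
    · rw [if_neg h]
      simp only [List.foldl_cons]
      rw [ih (pvF keys y) [y] (cur.foldl (fun rk s => PySem.List.pySetD rk s (r + 1)) ranks) (r + 1)]
      simp only [pvPairFold]
      rw [if_pos (fun he => h he.symm)]
      simp

lemma build_ranks_eq_alt (suffixes keys : List Int) (h : suffixes ≠ []) :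
    build_ranks suffixes keys = build_ranks_alt suffixes keys := by
  obtain ⟨x, tl, rfl⟩ : ∃ x tl, suffixes = x :: tl := by
    cases suffixes with
    | nil => exact absurd rfl h
    | cons a l => exact ⟨a, l, rfl⟩
  unfold build_ranks build_ranks_alt pvRunsB
  simp only [PySem.List.pyGetD_zero_cons]
  -- A side: index loop → fold over adjacent pairs → pair walk
  rw [pvIdxFoldZip
        (fun (st : List Int × Int) ab =>
          let cr := if PySem.List.pyGetD keys ab.1 0 ≠ PySem.List.pyGetD keys ab.2 0 then st.2 + 1 else st.2
          (PySem.List.pySetD st.1 ab.2 cr, cr)) 0 tl x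
        (PySem.List.pySetD (List.replicate (x :: tl).length (-1 : Int)) x 1, 1)]
  rw [pvFusedEqPairFold keys tl x]
  -- B side: the run-splitting fold → pvRunsAux → pair walk
  rw [pvRunsFoldlEqAux keys tl [] (PySem.List.pyGetD keys x 0) [x]]
  simp only [List.nil_append]
  rw [show PySem.List.pyGetD keys x 0 = pvF keys x from rfl,
      pvGroupsEqPairFold keys tl (pvF keys x) [x]
        (List.replicate (x :: tl).length (-1 : Int)) 0]
  norm_num

-- ===== VERDICT (by name: the statement is the Claim_ definition above) =====
theorem build_ranks_spec : Claim_equal_build_ranks := by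
  intro suffixes keys _ hpre
  unfold Spec_build_ranks
  exact build_ranks_eq_alt suffixes keys hpre.1
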